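-- pv_equiv track=rewrite | github.com/l15514559690-cmd/Scream-Code | src/repl_ui_render.py | _fence_language_if_open_at_end
-- ===== SOURCE A (Python) =====
-- def _fence_language_if_open_at_end(text: str) -> str | None:
--     """
--     扫描至 ``text`` 末尾：若停在未闭合的围栏代码块内，返回该块声明的语言标识（无则 ``text``）。
--     """
--     in_fence = False
--     lang = 'text'
--     for line in text.split('\n'):
--         s = line.lstrip()
--         if not s.startswith('```'):
--             continue
--         rest = s[3:].strip()
--         if not in_fence:
--             in_fence = True
--             lang = rest if rest else 'text'
--         else:
--             in_fence = False
--     return lang if in_fence else None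
-- ===== SOURCE B (Python) =====
-- def _fence_language_if_open_at_end(text: str) -> str | None:
--     fences = [line for line in text.split('\n') if line.lstrip().startswith('```')]
--     if len(fences) % 2 == 0:
--         return None
--     rest = fences[-1].lstrip()[3:].strip()
--     return rest if rest else 'text'
-- ===== Notes on version B (the rewrite author's own statement) =====
-- stated objective: simpler
-- what changed: Replaces the running open/close toggle with accumulated language by filtering the fence-marker lines once and deciding by parity of their count, reading the language only from the last fence line.
import Mathlib
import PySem

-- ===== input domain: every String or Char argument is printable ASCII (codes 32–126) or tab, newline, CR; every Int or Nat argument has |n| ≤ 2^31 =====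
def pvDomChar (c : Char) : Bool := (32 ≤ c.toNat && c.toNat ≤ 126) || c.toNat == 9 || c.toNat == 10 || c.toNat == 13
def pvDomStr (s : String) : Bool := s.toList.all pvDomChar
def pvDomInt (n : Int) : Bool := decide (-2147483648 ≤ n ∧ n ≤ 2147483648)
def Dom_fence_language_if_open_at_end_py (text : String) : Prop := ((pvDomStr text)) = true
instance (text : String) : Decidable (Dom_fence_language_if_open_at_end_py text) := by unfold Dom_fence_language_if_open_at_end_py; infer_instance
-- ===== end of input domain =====

-- B replaces A's running open/close toggle with a parity count of the fence lines,
-- reading the language from the last fence line only (objective: simpler).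

-- ===== PORT A =====
-- one iteration of A's for-loop over (in_fence, lang)
def fenceStepA (st : Bool × String) (line : String) : Bool × String :=
  let s := PySem.Str.lstrip line
  if ¬ PySem.Str.startswith s "```" then st
  else
    let rest := PySem.Str.strip (PySem.Str.slice s (some 3) none)
    if ¬ st.1 then (true, if rest = "" then "text" else rest)
    else (false, st.2)

def fence_language_if_open_at_end_py (text : String) : Option String :=
  let r := ((PySem.Str.split? text "\n").getD []).foldl fenceStepA (false, "text")
  if r.1 then some r.2 else none

-- ===== PORT B =====
def fence_language_if_open_at_end_py_alt (text : String) : Option String :=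
  let fences := ((PySem.Str.split? text "\n").getD []).filter
    (fun line => PySem.Str.startswith (PySem.Str.lstrip line) "```")
  if fences.length % 2 == 0 then none
  else
    match PySem.List.pyGet? fences (-1) with   -- fences[-1]; never none when the length is odd
    | none => none
    | some f =>
      let rest := PySem.Str.strip (PySem.Str.slice (PySem.Str.lstrip f) (some 3) none)
      some (if rest = "" then "text" else rest)

-- ===== PRECONDITION & SPEC =====
def Spec_fence_language_if_open_at_end_py (text : String) (out : Option String) : Prop := out = fence_language_if_open_at_end_py_alt text
instance (text : String) (out : Option String) : Decidable (Spec_fence_language_if_open_at_end_py text out) := by unfold Spec_fence_language_if_open_at_end_py; infer_instance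

-- ===== CLAIM (what is proved, stated in full; the proofs are below) =====
def Claim_equal_fence_language_if_open_at_end_py : Prop := ∀ (text : String), Dom_fence_language_if_open_at_end_py text → Spec_fence_language_if_open_at_end_py text (fence_language_if_open_at_end_py text)

-- ===== LEMMAS AND PROOFS =====

-- the language B reads off a fence line
def fenceLang (f : String) : String :=
  let rest := PySem.Str.strip (PySem.Str.slice (PySem.Str.lstrip f) (some 3) none)
  if rest = "" then "text" else rest

def isFence (line : String) : Bool := PySem.Str.startswith (PySem.Str.lstrip line) "```"

-- A's step is the identity on non-fence lines
lemma fenceStepA_nonfence (st : Bool × String) (line : String) (h : isFence line = false) :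
    fenceStepA st line = st := by
  simp [fenceStepA, isFence] at *
  simp [h]

lemma fenceStepA_fence (st : Bool × String) (line : String) (h : isFence line = true) :
    fenceStepA st line = if st.1 then (false, st.2) else (true, fenceLang line) := by
  simp [fenceStepA, isFence, fenceLang] at *
  rcases st with ⟨b, l⟩
  cases b <;> simp [h]

-- folding A's step over any lines equals folding it over the fence lines only
lemma foldl_fenceStepA_filter (ls : List String) (st : Bool × String) :
    ls.foldl fenceStepA st = (ls.filter isFence).foldl fenceStepA st := by
  induction ls generalizing st with
  | nil => rfl
  | cons x xs ih =>
    by_cases h : isFence x = true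
    · simp [h, List.foldl_cons, ih]
    · simp only [Bool.not_eq_true] at h
      simp [h, List.foldl_cons, fenceStepA_nonfence _ _ h, ih]

-- the flag toggles with each fence line: final flag = initial flag XOR parity of the count
lemma foldl_fences_flag (fs : List String) :
    ∀ st : Bool × String, (∀ x ∈ fs, isFence x = true) →
      (fs.foldl fenceStepA st).1 = (st.1 != (fs.length % 2 == 1)) := by
  induction fs with
  | nil => intro st _; simp
  | cons x xs ih =>
    intro st hf
    have hx : isFence x = true := hf x (by simp)
    have hxs : ∀ y ∈ xs, isFence y = true := fun y hy => hf y (by simp [hy])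
    simp only [List.foldl_cons, fenceStepA_fence _ _ hx]
    rw [ih _ hxs]
    rcases st with ⟨b, l⟩
    rcases Nat.even_or_odd xs.length with ⟨k, hk⟩ | ⟨k, hk⟩
    · have h1 : xs.length % 2 = 0 := by omega
      have h2 : (x :: xs).length % 2 = 1 := by simp only [List.length_cons]; omega
      cases b <;> simp [h1, h2] <;> omega
    · have h1 : xs.length % 2 = 1 := by omega
      have h2 : (x :: xs).length % 2 = 0 := by simp only [List.length_cons]; omega
      cases b <;> simp [h1, h2] <;> omega

-- when the flag ends up true, the accumulated lang is the last fence line's language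
lemma foldl_fences_lang (fs : List String) :
    ∀ (g : String) (st : Bool × String), (∀ x ∈ fs, isFence x = true) →
      fs.getLast? = some g → (fs.foldl fenceStepA st).1 = true →
      (fs.foldl fenceStepA st).2 = fenceLang g := by
  induction fs with
  | nil => intro g st _ hg; simp at hg
  | cons x xs ih =>
    intro g st hf hg ht
    have hx : isFence x = true := hf x (by simp)
    have hxs : ∀ y ∈ xs, isFence y = true := fun y hy => hf y (by simp [hy])
    simp only [List.foldl_cons, fenceStepA_fence _ _ hx] at ht ⊢
    cases xs with
    | nil =>
      simp at hg
      rcases st with ⟨b, l⟩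
      cases b
      · simp at ht ⊢; rw [hg]
      · simp at ht
    | cons y ys =>
      have hg' : (y :: ys).getLast? = some g := by
        rw [List.getLast?_cons_cons] at hg; exact hg
      exact ih g _ hxs hg' ht

lemma main_eq (text : String) :
    fence_language_if_open_at_end_py text = fence_language_if_open_at_end_py_alt text := by
  unfold fence_language_if_open_at_end_py fence_language_if_open_at_end_py_alt
  set ls := (PySem.Str.split? text "\n").getD [] with hls
  set fs := ls.filter isFence with hfs
  have hfilter : ls.filter (fun line => PySem.Str.startswith (PySem.Str.lstrip line) "```") = fs := rfl
  have hfences : ∀ x ∈ fs, isFence x = true := fun x hx => (List.mem_filter.mp hx).2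
  have hflag := foldl_fences_flag fs (false, "text") hfences
  rw [foldl_fenceStepA_filter]
  simp only [← hfs, hfilter]
  by_cases hodd : fs.length % 2 = 1
  · -- odd: flag is true, both return the last fence's language
    have ht : (fs.foldl fenceStepA (false, "text")).1 = true := by
      rw [hflag]; simp [hodd]
    have hne : fs ≠ [] := by
      intro h; rw [h] at hodd; simp at hodd
    rw [ht]
    simp only [if_true]
    have : (fs.length % 2 == 0) = false := by simp [hodd]
    rw [this]
    simp only [Bool.false_eq_true, if_false]
    rw [PySem.List.pyGet?_neg_one]
    cases hg : fs.getLast? with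
    | none => exact absurd (List.getLast?_eq_none_iff.mp hg) hne
    | some g =>
      have hl := foldl_fences_lang fs g (false, "text") hfences hg ht
      simp [hl, fenceLang]
  · -- even: flag is false, both return none
    have heven : fs.length % 2 = 0 := by omega
    have ht : (fs.foldl fenceStepA (false, "text")).1 = false := by
      rw [hflag]; simp [hodd]
    rw [ht]
    have : (fs.length % 2 == 0) = true := by simp [heven]
    rw [this]
    simp

-- ===== VERDICT (by name: the statement is the Claim_ definition above) =====
theorem fence_language_if_open_at_end_py_spec : Claim_equal_fence_language_if_open_at_end_py := by
  intro text _
  unfold Spec_fence_language_if_open_at_end_py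
  exact main_eq text
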